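-- pv_equiv track=rewrite | github.com/ntornow/unity2rbxlx | converter/converter/code_transpiler.py | _compute_dependency_levels
-- ===== SOURCE A (Python) =====
-- def _topological_sort(graph: dict[str, set[str]]) -> list[str]:
--     """Return nodes in dependency order — deps first, cycles broken
--     arbitrarily. Deterministic: iteration order + ``sorted()`` mean the
--     same input always produces the same output.
--     """
--     visited: set[str] = set()
--     on_stack: set[str] = set()
--     order: list[str] = []
--
--     def _visit(node: str) -> None:
--         if node in visited or node in on_stack:
--             return
--         on_stack.add(node)
--         for dep in sorted(graph.get(node, set())):
--             _visit(dep)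
--         on_stack.discard(node)
--         visited.add(node)
--         order.append(node)
--
--     for node in sorted(graph):
--         _visit(node)
--     return order
--
-- def _compute_dependency_levels(
--     graph: dict[str, set[str]],
-- ) -> list[list[str]]:
--     """Group stems into levels where all of a node's deps land in earlier
--     levels. Scripts in the same level have no dep on each other, so they
--     can run concurrently without starving the dependency-aware prompt.
--     """
--     order = _topological_sort(graph)
--     level_of: dict[str, int] = {}
--     for stem in order:
--         deps = graph.get(stem, set())
--         if not deps:
--             level_of[stem] = 0
--         else:
--             level_of[stem] = max(
--                 (level_of[d] for d in deps if d in level_of), default=-1,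
--             ) + 1
--
--     levels: dict[int, list[str]] = {}
--     for stem, lvl in level_of.items():
--         levels.setdefault(lvl, []).append(stem)
--     # Sort within level for deterministic ordering; level 0 first.
--     return [sorted(levels[k]) for k in sorted(levels)]
-- ===== SOURCE B (Python) =====
-- def _compute_dependency_levels(
--     graph: dict[str, set[str]],
-- ) -> list[list[str]]:
--     """Single memoized DFS: each node's level is assigned directly at
--     post-order time, fusing the topological sort with the level scan."""
--     level_of: dict[str, int] = {}
--     on_stack: set[str] = set()
--
--     def _visit(node: str) -> None:
--         if node in level_of or node in on_stack:
--             return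
--         on_stack.add(node)
--         deps = graph.get(node, set())
--         for dep in sorted(deps):
--             _visit(dep)
--         on_stack.discard(node)
--         level_of[node] = max(
--             (level_of[d] for d in deps if d in level_of), default=-1,
--         ) + 1
--
--     for node in sorted(graph):
--         _visit(node)
--
--     levels: dict[int, list[str]] = {}
--     for stem, lvl in level_of.items():
--         levels.setdefault(lvl, []).append(stem)
--     return [sorted(levels[k]) for k in sorted(levels)]
-- ===== Notes on version B (the rewrite author's own statement) =====
-- stated objective: alternative
-- what changed: Fused A's two phases (DFS topological sort producing an order list, then a separate scan over that list computing levels) into a single memoized DFS that assigns each node's level directly at post-order time, eliminating the order list and the second pass.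
import Mathlib
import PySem

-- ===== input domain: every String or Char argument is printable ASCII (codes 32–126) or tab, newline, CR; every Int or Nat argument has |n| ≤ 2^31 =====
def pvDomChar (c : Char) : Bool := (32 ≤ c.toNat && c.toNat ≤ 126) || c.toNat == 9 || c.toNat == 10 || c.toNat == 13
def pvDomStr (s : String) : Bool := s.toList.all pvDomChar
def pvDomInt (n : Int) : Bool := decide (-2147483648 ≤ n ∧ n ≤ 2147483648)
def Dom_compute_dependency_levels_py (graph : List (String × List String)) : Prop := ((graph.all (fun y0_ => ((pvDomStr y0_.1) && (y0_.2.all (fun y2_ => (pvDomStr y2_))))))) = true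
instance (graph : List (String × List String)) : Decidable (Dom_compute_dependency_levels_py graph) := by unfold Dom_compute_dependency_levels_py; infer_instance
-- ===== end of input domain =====

-- B fuses A's two phases (topological sort, then a separate level scan) into ONE memoized
-- DFS that assigns each node's level at post-order time; objective: alternative decomposition.
-- Both ports use a fuel parameter only as a totality device for the recursive DFS (the fuel
-- bound exceeds the maximal possible recursion depth, so it never changes the computed value).

-- ===== PORT A =====
-- fuel bound for the DFS recursion (totality device, shared by both ports)
def pvFuel (graph : List (String × List String)) : Nat :=
  graph.foldl (fun n p => n + 1 + p.2.length) 1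

-- the body of A's `_visit`: state = (visited, on_stack, order)
def pvVisitA (g : PySem.Dict String (List String)) :
    Nat → String → PySem.Set String × PySem.Set String × List String →
    PySem.Set String × PySem.Set String × List String
  | 0, _, st => st
  | fuel+1, node, st =>
    if st.1.contains node || st.2.1.contains node then st
    else
      let st' := (PySem.List.sorted (g.getD node []) (fun x => x) false).foldl
        (fun s dep => pvVisitA g fuel dep s) (st.1, PySem.Set.add st.2.1 node, st.2.2)
      (PySem.Set.add st'.1 node, PySem.Set.discard st'.2.1 node, st'.2.2 ++ [node])

-- A's per-stem level: 0 if no deps, else max(level_of[d] for d in deps if d in level_of, default=-1)+1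
def pvLevelValA (g : PySem.Dict String (List String)) (lv : PySem.Dict String Int) (stem : String) : Int :=
  let deps := g.getD stem []
  if deps = [] then 0
  else PySem.List.maxD ((deps.filter (fun d => lv.contains d)).map (fun d => lv.getD d 0)) (fun x => x) (-1) + 1

-- A's second phase: the `for stem in order` scan filling level_of
def pvScanA (g : PySem.Dict String (List String)) (order : List String) : PySem.Dict String Int :=
  order.foldl (fun lv stem => lv.insert stem (pvLevelValA g lv stem)) PySem.Dict.empty

def compute_dependency_levels_py (graph : List (String × List String)) : List (List String) :=
  let g := PySem.Dict.mk graph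
  let st := (PySem.List.sorted g.keys (fun x => x) false).foldl
      (fun s node => pvVisitA g (pvFuel graph) node s)
      (PySem.Set.empty, PySem.Set.empty, ([] : List String))
  let order := st.2.2
  let levelOf := pvScanA g order
  let levels := levelOf.items.foldl
      (fun lvs p => lvs.modify p.2 ([] : List String) (fun l => l ++ [p.1])) PySem.Dict.empty
  (PySem.List.sorted levels.keys (fun x => x) false).map
    (fun k => PySem.List.sorted (levels.getD k []) (fun x => x) false)

-- ===== PORT B =====
-- B's post-order level: max(level_of[d] for d in deps if d in level_of, default=-1)+1
def pvLevelValB (lv : PySem.Dict String Int) (deps : List String) : Int :=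
  PySem.List.maxD ((deps.filter (fun d => lv.contains d)).map (fun d => lv.getD d 0)) (fun x => x) (-1) + 1

-- the body of B's `_visit`: state = (on_stack, level_of); the level is assigned in post-order
def pvVisitB (g : PySem.Dict String (List String)) :
    Nat → String → PySem.Set String × PySem.Dict String Int →
    PySem.Set String × PySem.Dict String Int
  | 0, _, st => st
  | fuel+1, node, st =>
    if st.2.contains node || st.1.contains node then st
    else
      let st' := (PySem.List.sorted (g.getD node []) (fun x => x) false).foldl
        (fun s dep => pvVisitB g fuel dep s) (PySem.Set.add st.1 node, st.2)
      (PySem.Set.discard st'.1 node, st'.2.insert node (pvLevelValB st'.2 (g.getD node [])))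

def compute_dependency_levels_py_alt (graph : List (String × List String)) : List (List String) :=
  let g := PySem.Dict.mk graph
  let st := (PySem.List.sorted g.keys (fun x => x) false).foldl
      (fun s node => pvVisitB g (pvFuel graph) node s)
      (PySem.Set.empty, PySem.Dict.empty)
  let levelOf := st.2
  let levels := levelOf.items.foldl
      (fun lvs p => lvs.modify p.2 ([] : List String) (fun l => l ++ [p.1])) PySem.Dict.empty
  (PySem.List.sorted levels.keys (fun x => x) false).map
    (fun k => PySem.List.sorted (levels.getD k []) (fun x => x) false)

-- ===== PRECONDITION & SPEC =====
def Spec_compute_dependency_levels_py (graph : List (String × List String)) (out : List (List String)) : Prop := out = compute_dependency_levels_py_alt graph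
instance (graph : List (String × List String)) (out : List (List String)) : Decidable (Spec_compute_dependency_levels_py graph out) := by unfold Spec_compute_dependency_levels_py; infer_instance

-- ===== CLAIM (what is proved, stated in full; the proofs are below) =====
def Claim_equal_compute_dependency_levels_py : Prop := ∀ (graph : List (String × List String)), Dom_compute_dependency_levels_py graph → Spec_compute_dependency_levels_py graph (compute_dependency_levels_py graph)

-- ===== LEMMAS AND PROOFS =====

-- the simulation relation between A's DFS state and B's
def pvRel (g : PySem.Dict String (List String))
    (a : PySem.Set String × PySem.Set String × List String)
    (b : PySem.Set String × PySem.Dict String Int) : Prop :=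
  b.1 = a.2.1 ∧ a.1 = PySem.Set.ofList a.2.2 ∧ b.2 = pvScanA g a.2.2

theorem pvScanA_contains (g : PySem.Dict String (List String)) (ord : List String) (x : String) :
    (pvScanA g ord).contains x = (PySem.Set.ofList ord).contains x := by
  have hk : (pvScanA g ord).keys = PySem.Set.update PySem.Dict.empty.keys ord :=
    PySem.Dict.keys_foldl_insert ord (pvLevelValA g) PySem.Dict.empty
  rw [PySem.Dict.contains_eq_decide_mem_keys, hk]
  simp [PySem.Set.contains, PySem.Dict.keys_empty]

theorem pvOfList_append (l : List String) (x : String) :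
    PySem.Set.ofList (l ++ [x]) = PySem.Set.add (PySem.Set.ofList l) x := by
  simp [PySem.Set.ofList_eq_foldl, List.foldl_append]

theorem pvScanA_append (g : PySem.Dict String (List String)) (ord : List String) (x : String) :
    pvScanA g (ord ++ [x]) = (pvScanA g ord).insert x (pvLevelValA g (pvScanA g ord) x) := by
  simp [pvScanA, List.foldl_append]

theorem pvLevelVal_eq (g : PySem.Dict String (List String)) (lv : PySem.Dict String Int) (stem : String) :
    pvLevelValA g lv stem = pvLevelValB lv (g.getD stem []) := by
  unfold pvLevelValA pvLevelValB
  cases h : g.getD stem [] with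
  | nil => simp
  | cons a l => simp

-- a relation preserved pointwise by the loop bodies is preserved by the same foldl
theorem pvFoldlRel {α β γ : Type} (R : α → β → Prop) (fA : α → γ → α) (fB : β → γ → β)
    (h : ∀ x a b, R a b → R (fA a x) (fB b x)) :
    ∀ (l : List γ) (a : α) (b : β), R a b → R (l.foldl fA a) (l.foldl fB b) := by
  intro l
  induction l with
  | nil => intro a b hab; exact hab
  | cons x t ih => intro a b hab; exact ih _ _ (h x a b hab)

theorem pvVisit_rel (g : PySem.Dict String (List String)) :
    ∀ (fuel : Nat) (node : String) a b, pvRel g a b →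
      pvRel g (pvVisitA g fuel node a) (pvVisitB g fuel node b) := by
  intro fuel
  induction fuel with
  | zero => intro node a b hab; simpa [pvVisitA, pvVisitB] using hab
  | succ fuel ih =>
    intro node a b hab
    obtain ⟨h1, h2, h3⟩ := hab
    have hguard : (b.2.contains node || b.1.contains node)
        = (a.1.contains node || a.2.1.contains node) := by
      rw [h1, h2, h3, pvScanA_contains, Bool.or_comm]
    rw [pvVisitA, pvVisitB, hguard]
    by_cases hc : (a.1.contains node || a.2.1.contains node) = true
    · simp only [hc, if_true]; exact ⟨h1, h2, h3⟩
    · simp only [Bool.not_eq_true] at hc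
      simp only [hc, Bool.false_eq_true, if_false]
      have hinit : pvRel g (a.1, PySem.Set.add a.2.1 node, a.2.2)
          (PySem.Set.add b.1 node, b.2) := ⟨by simp [h1], h2, h3⟩
      have hst := pvFoldlRel (pvRel g)
        (fun s dep => pvVisitA g fuel dep s) (fun s dep => pvVisitB g fuel dep s)
        (fun x a b hab => ih x a b hab)
        (PySem.List.sorted (g.getD node []) (fun x => x) false)
        _ _ hinit
      obtain ⟨g1, g2, g3⟩ := hst
      refine ⟨by simp [g1], ?_, ?_⟩
      · simp only [g2, pvOfList_append]
      · rw [g3, pvScanA_append, pvLevelVal_eq]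

theorem compute_dependency_levels_py_eq (graph : List (String × List String)) :
    compute_dependency_levels_py graph = compute_dependency_levels_py_alt graph := by
  unfold compute_dependency_levels_py compute_dependency_levels_py_alt
  dsimp only
  have h := pvFoldlRel (pvRel (PySem.Dict.mk graph))
    (fun s node => pvVisitA (PySem.Dict.mk graph) (pvFuel graph) node s)
    (fun s node => pvVisitB (PySem.Dict.mk graph) (pvFuel graph) node s)
    (fun x a b hab => pvVisit_rel (PySem.Dict.mk graph) (pvFuel graph) x a b hab)
    (PySem.List.sorted (PySem.Dict.mk graph).keys (fun x => x) false)
    (PySem.Set.empty, PySem.Set.empty, ([] : List String))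
    (PySem.Set.empty, PySem.Dict.empty)
    ⟨rfl, rfl, rfl⟩
  rw [h.2.2]

-- ===== VERDICT (by name: the statement is the Claim_ definition above) =====
theorem compute_dependency_levels_py_spec : Claim_equal_compute_dependency_levels_py := by
  intro graph _
  unfold Spec_compute_dependency_levels_py
  exact compute_dependency_levels_py_eq graph
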